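-- pv_equiv track=rewrite | github.com/Vicente-Martins09/CC | src/Metodo_SelecNodes.py | verifica_existe_prioridade
-- ===== SOURCE A (Python) =====
-- def verifica_existe_prioridade(listaIps, ipsIndv):  # listaIps = [[('ip1', 4), ('ip2', 7), ('ip3', -3)], [('ip2', 7)]] res = 1  listaIps = [[('ip1', 0), ('ip2', 0), ('ip3', 0)], [('ip2', 0)]] res = 0
--     ipsVerificados = []
--     aux = 0
--     aux2 = listaIps[0][0][1]
--
--     for array in listaIps:
--          for tpl in array:
--             if aux > ipsIndv:
--                return 0
--
--             if ipsVerificados.count(tpl) == 0: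
--                aux += 1
--                if tpl[1] != aux2:
--                   return 1
--                else:
--                   ipsVerificados.append(tpl)
--
--     return 0
-- ===== SOURCE B (Python) =====
-- def verifica_existe_prioridade(listaIps, ipsIndv):
--     baseline = listaIps[0][0][1]
--     uniques = list(dict.fromkeys(sum(listaIps, [])))
--     for j, tpl in enumerate(uniques):
--         if j > ipsIndv:
--             return 0
--         if tpl[1] != baseline:
--             return 1
--     return 0
-- ===== Notes on version B (the rewrite author's own statement) =====
-- stated objective: simpler
-- what changed: Replaces A's interleaved scan (a growing seen-list with count() membership tests, a manual distinct counter and an in-loop guard) by two phases: dedup the flattened list once with dict.fromkeys, then one bounded enumerate loop comparing each distinct tuple's priority to the baseline.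
-- outside the precondition, e.g. on verifica_existe_prioridade([], 0): A raises IndexError, B raises IndexError; on verifica_existe_prioridade([[]], 0): A raises IndexError, B raises IndexError
import Mathlib
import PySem

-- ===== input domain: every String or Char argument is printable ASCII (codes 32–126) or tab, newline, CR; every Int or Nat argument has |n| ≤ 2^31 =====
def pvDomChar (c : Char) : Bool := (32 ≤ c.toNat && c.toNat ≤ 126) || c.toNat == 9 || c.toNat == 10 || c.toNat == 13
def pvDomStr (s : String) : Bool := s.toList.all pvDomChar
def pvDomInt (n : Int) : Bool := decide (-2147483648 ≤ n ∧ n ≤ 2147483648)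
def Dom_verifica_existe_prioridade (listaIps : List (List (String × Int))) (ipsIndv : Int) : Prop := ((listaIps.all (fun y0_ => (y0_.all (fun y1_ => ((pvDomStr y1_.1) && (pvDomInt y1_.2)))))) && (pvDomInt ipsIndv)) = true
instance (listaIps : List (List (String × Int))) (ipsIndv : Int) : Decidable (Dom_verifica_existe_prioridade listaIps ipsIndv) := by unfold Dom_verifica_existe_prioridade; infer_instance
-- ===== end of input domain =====

-- B replaces A's interleaved seen-list/count scan by a dedup-first phase (dict.fromkeys over
-- the flattened list) followed by one bounded enumerate scan; objective: simpler.

-- ===== PORT A =====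
-- inner 'for tpl in array' loop: state = (early-return value?, ipsVerificados, aux)
def pvInnerA (ipsIndv aux2 : Int) : List (String × Int) → List (String × Int) → Int → Option Int × List (String × Int) × Int
  | [], seen, aux => (none, seen, aux)
  | t :: rest, seen, aux =>
    if aux > ipsIndv then (some 0, seen, aux)
    else if PySem.List.count seen t = 0 then
      (if t.2 ≠ aux2 then (some 1, seen, aux + 1)
       else pvInnerA ipsIndv aux2 rest (seen ++ [t]) (aux + 1))
    else pvInnerA ipsIndv aux2 rest seen aux

-- outer 'for array in listaIps' loop
def pvOuterA (ipsIndv aux2 : Int) : List (List (String × Int)) → List (String × Int) → Int → Int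
  | [], _, _ => 0
  | arr :: rest, seen, aux =>
    match pvInnerA ipsIndv aux2 arr seen aux with
    | (some r, _, _) => r
    | (none, seen', aux') => pvOuterA ipsIndv aux2 rest seen' aux'

def verifica_existe_prioridade (listaIps : List (List (String × Int))) (ipsIndv : Int) : Int :=
  match PySem.List.pyGet? listaIps 0 with
  | none => 0  -- IndexError: outside Pre_
  | some arr0 =>
    match PySem.List.pyGet? arr0 0 with
    | none => 0  -- IndexError: outside Pre_
    | some t0 => pvOuterA ipsIndv t0.2 listaIps [] 0

-- ===== PORT B =====
-- 'for j, tpl in enumerate(uniques): …'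
def pvScanB (ipsIndv baseline : Int) : List (Int × (String × Int)) → Int
  | [] => 0
  | (j, t) :: rest =>
    if j > ipsIndv then 0
    else if t.2 ≠ baseline then 1
    else pvScanB ipsIndv baseline rest

def verifica_existe_prioridade_alt (listaIps : List (List (String × Int))) (ipsIndv : Int) : Int :=
  match PySem.List.pyGet? listaIps 0 with
  | none => 0  -- IndexError: outside Pre_
  | some arr0 =>
    match PySem.List.pyGet? arr0 0 with
    | none => 0  -- IndexError: outside Pre_
    | some t0 =>
      -- uniques = list(dict.fromkeys(sum(listaIps, [])))
      pvScanB ipsIndv t0.2 (PySem.List.enumerate (PySem.List.dedup listaIps.flatten))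

-- ===== PRECONDITION & SPEC =====
-- Pre_ excludes exactly the inputs where both A and B raise IndexError reading listaIps[0][0].
def Pre_verifica_existe_prioridade (listaIps : List (List (String × Int))) (ipsIndv : Int) : Prop :=
  listaIps ≠ [] ∧ listaIps.headI ≠ []
instance (listaIps : List (List (String × Int))) (ipsIndv : Int) : Decidable (Pre_verifica_existe_prioridade listaIps ipsIndv) := by unfold Pre_verifica_existe_prioridade; infer_instance

def pvWitness_verifica_existe_prioridade : (List (List (String × Int))) × Int := ([[("a", 1), ("b", 2)]], 1)

def Spec_verifica_existe_prioridade (listaIps : List (List (String × Int))) (ipsIndv : Int) (out : Int) : Prop := out = verifica_existe_prioridade_alt listaIps ipsIndv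
instance (listaIps : List (List (String × Int))) (ipsIndv : Int) (out : Int) : Decidable (Spec_verifica_existe_prioridade listaIps ipsIndv out) := by unfold Spec_verifica_existe_prioridade; infer_instance

-- ===== CLAIM (what is proved, stated in full; the proofs are below) =====
def Claim_equal_verifica_existe_prioridade : Prop := ∀ (listaIps : List (List (String × Int))) (ipsIndv : Int), Dom_verifica_existe_prioridade listaIps ipsIndv → Pre_verifica_existe_prioridade listaIps ipsIndv → Spec_verifica_existe_prioridade listaIps ipsIndv (verifica_existe_prioridade listaIps ipsIndv)

-- ===== LEMMAS AND PROOFS =====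

-- A's two nested loops, fused over the flattened tuple list
def pvFlatA (ipsIndv aux2 : Int) : List (String × Int) → List (String × Int) → Int → Int
  | [], _, _ => 0
  | t :: rest, seen, aux =>
    if aux > ipsIndv then 0
    else if PySem.List.count seen t = 0 then
      (if t.2 ≠ aux2 then 1
       else pvFlatA ipsIndv aux2 rest (seen ++ [t]) (aux + 1))
    else pvFlatA ipsIndv aux2 rest seen aux

-- the distinct tuples of ts, in first-appearance order, that are not already in seen
def pvNewD : List (String × Int) → List (String × Int) → List (String × Int)
  | _, [] => []
  | seen, t :: rest => if t ∈ seen then pvNewD seen rest else t :: pvNewD (seen ++ [t]) rest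

theorem pvFlatA_append (i b : Int) (arr ts : List (String × Int)) (seen : List (String × Int)) (aux : Int) :
    pvFlatA i b (arr ++ ts) seen aux =
      (match pvInnerA i b arr seen aux with
       | (some r, _, _) => r
       | (none, seen', aux') => pvFlatA i b ts seen' aux') := by
  induction arr generalizing seen aux with
  | nil => simp [pvInnerA]
  | cons t rest ih =>
    rw [List.cons_append, pvFlatA, pvInnerA]
    by_cases h1 : aux > i
    · rw [if_pos h1, if_pos h1]
    · rw [if_neg h1, if_neg h1]
      by_cases h2 : PySem.List.count seen t = 0
      · rw [if_pos h2, if_pos h2]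
        by_cases h3 : t.2 ≠ b
        · rw [if_pos h3, if_pos h3]
        · rw [if_neg h3, if_neg h3, ih]
      · rw [if_neg h2, if_neg h2, ih]

theorem pvOuterA_eq_flat (i b : Int) (ls : List (List (String × Int))) (seen : List (String × Int)) (aux : Int) :
    pvOuterA i b ls seen aux = pvFlatA i b ls.flatten seen aux := by
  induction ls generalizing seen aux with
  | nil => simp [pvOuterA, pvFlatA]
  | cons arr rest ih =>
    rw [pvOuterA, List.flatten_cons, pvFlatA_append]
    cases h : pvInnerA i b arr seen aux with
    | mk o p =>
      cases o with
      | none => simp [ih]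
      | some r => simp

theorem pvScanB_gt (i b j : Int) (l : List (String × Int)) (hj : j > i) :
    pvScanB i b (PySem.List.enumerate l j) = 0 := by
  cases l with
  | nil => simp [PySem.List.enumerate_nil, pvScanB]
  | cons t rest => simp [PySem.List.enumerate_cons, pvScanB, hj]

theorem pvFlatA_eq_scan (i b : Int) (ts seen : List (String × Int)) :
    pvFlatA i b ts seen (seen.length : Int) =
      pvScanB i b (PySem.List.enumerate (pvNewD seen ts) (seen.length : Int)) := by
  induction ts generalizing seen with
  | nil => simp [pvFlatA, pvNewD, PySem.List.enumerate_nil, pvScanB]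
  | cons t rest ih =>
    rw [pvFlatA, pvNewD]
    by_cases hg : (seen.length : Int) > i
    · simp only [hg, if_true]
      by_cases hm : t ∈ seen
      · rw [if_pos hm, pvScanB_gt i b _ _ hg]
      · rw [if_neg hm, PySem.List.enumerate_cons, pvScanB, if_pos hg]
    · have hcnt : PySem.List.count seen t = 0 ↔ t ∉ seen := by
        rw [PySem.List.count_eq, List.count_eq_zero]
      simp only [hg, if_false]
      by_cases hm : t ∈ seen
      · rw [if_neg (fun h => (hcnt.mp h) hm), if_pos hm, ih]
      · rw [if_pos (hcnt.mpr hm), if_neg hm, PySem.List.enumerate_cons, pvScanB, if_neg hg]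
        by_cases hb : t.2 ≠ b
        · simp [hb]
        · have := ih (seen ++ [t])
          simp only [List.length_append, List.length_cons, List.length_nil, Nat.cast_add,
            Nat.cast_one, zero_add] at this
          simp [hb, this]

theorem pvDedup_eq_newD (ts : List (String × Int)) : PySem.List.dedup ts = pvNewD [] ts := by
  have key : ∀ (l s : List (String × Int)), l.foldl PySem.Set.add s = s ++ pvNewD s l := by
    intro l
    induction l with
    | nil => intro s; simp [pvNewD]
    | cons t rest ih =>
      intro s
      rw [List.foldl_cons, pvNewD]
      by_cases hm : t ∈ s
      · rw [if_pos hm]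
        have : PySem.Set.add s t = s := by simp [PySem.Set.add, hm]
        rw [this, ih]
      · rw [if_neg hm]
        have : PySem.Set.add s t = s ++ [t] := by simp [PySem.Set.add, hm]
        rw [this, ih, List.append_assoc]
        rfl
  rw [PySem.List.dedup_eq_ofList, PySem.Set.ofList_eq_foldl]
  simpa using key ts []

-- ===== VERDICT (by name: the statement is the Claim_ definition above) =====
theorem verifica_existe_prioridade_spec : Claim_equal_verifica_existe_prioridade := by
  intro listaIps ipsIndv _ hpre
  obtain ⟨h1, h2⟩ := hpre
  rcases listaIps with _ | ⟨arr0, ls⟩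
  · exact absurd rfl h1
  rcases arr0 with _ | ⟨t0, ts0⟩
  · simp at h2
  show verifica_existe_prioridade _ _ = verifica_existe_prioridade_alt _ _
  have hg1 : PySem.List.pyGet? ((t0 :: ts0) :: ls) 0 = some (t0 :: ts0) := by
    simp [PySem.List.pyGet?, PySem.List.pyIdx?]
  have hg2 : PySem.List.pyGet? (t0 :: ts0) 0 = some t0 := by
    simp [PySem.List.pyGet?, PySem.List.pyIdx?]
  simp only [verifica_existe_prioridade, verifica_existe_prioridade_alt, hg1, hg2]
  rw [pvOuterA_eq_flat, pvDedup_eq_newD]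
  have := pvFlatA_eq_scan ipsIndv t0.2 (((t0 :: ts0) :: ls).flatten) []
  simpa using this
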